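-- pv_equiv track=rewrite | github.com/PLSE-Lab/Python-MLAPI-expl | python_sources/final-causal-covid.py | format_body
-- ===== SOURCE A (Python) =====
-- def format_body(body_text):
--     texts = [(di['section'], di['text']) for di in body_text]
--     texts_di = {di['section']: "" for di in body_text}
--
--     for section, text in texts:
--         texts_di[section] += text
--
--     body = ""
--
--     for section, text in texts_di.items():
--         body += section
--         body += "\n\n"
--         body += text
--         body += "\n\n"
--
--     return body
-- ===== SOURCE B (Python) =====
-- def format_body(body_text):
--     sections = []
--     for di in body_text:
--         if di['section'] not in sections:
--             sections.append(di['section'])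
--     body = ""
--     for s in sections:
--         body += s
--         body += "\n\n"
--         for di in body_text:
--             if di['section'] == s:
--                 body += di['text']
--         body += "\n\n"
--     return body
-- ===== Notes on version B (the rewrite author's own statement) =====
-- stated objective: alternative
-- what changed: Replaces A's grouping dict (pre-seeded keys, then accumulated, then iterated via items()) by a first-appearance dedup of section names followed by one rescan of body_text per distinct section, concatenating matching texts directly into the output string.
import Mathlib
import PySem

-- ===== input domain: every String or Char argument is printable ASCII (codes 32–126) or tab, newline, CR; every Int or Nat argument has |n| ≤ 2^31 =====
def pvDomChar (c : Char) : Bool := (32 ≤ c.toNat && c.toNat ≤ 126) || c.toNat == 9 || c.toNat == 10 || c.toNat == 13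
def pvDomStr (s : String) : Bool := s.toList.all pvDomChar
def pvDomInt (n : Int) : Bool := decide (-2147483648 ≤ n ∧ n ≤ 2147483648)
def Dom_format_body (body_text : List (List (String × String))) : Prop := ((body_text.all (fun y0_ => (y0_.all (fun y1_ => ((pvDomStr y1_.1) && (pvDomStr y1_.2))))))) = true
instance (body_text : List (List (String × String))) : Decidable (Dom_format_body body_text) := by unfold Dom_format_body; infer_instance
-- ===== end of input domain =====

-- B replaces A's grouping dict by a first-appearance dedup of sections plus one rescan of
-- body_text per distinct section (alternative decomposition, not claimed faster).
-- di['section'] / di['text'] : first-match lookup in the association list (dict convention)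
def pvSec (di : List (String × String)) : String := ((PySem.Dict.mk di).get? "section").getD ""
def pvTxt (di : List (String × String)) : String := ((PySem.Dict.mk di).get? "text").getD ""

-- ===== PORT A =====
def format_body (body_text : List (List (String × String))) : String :=
  let texts : List (String × String) := body_text.map (fun di => (pvSec di, pvTxt di))
  let texts_di : PySem.Dict String String :=
    body_text.foldl (fun d di => d.insert (pvSec di) "") PySem.Dict.empty
  let texts_di := texts.foldl (fun d p => d.insert p.1 (d.getD p.1 "" ++ p.2)) texts_di
  texts_di.items.foldl (fun body p => body ++ p.1 ++ "\n\n" ++ p.2 ++ "\n\n") ""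

-- ===== PORT B =====
def format_body_alt (body_text : List (List (String × String))) : String :=
  -- sections: first-appearance dedup loop = PySem.Set.ofList
  let sections : List String := PySem.Set.ofList (body_text.map (fun di => pvSec di))
  sections.foldl (fun body s =>
    (body_text.foldl (fun body di => if pvSec di == s then body ++ pvTxt di else body)
      (body ++ s ++ "\n\n")) ++ "\n\n") ""

-- ===== PRECONDITION & SPEC =====
-- Pre_ excludes exactly the dicts missing a 'section' or 'text' key, on which A raises KeyError.
def Pre_format_body (body_text : List (List (String × String))) : Prop :=
  (body_text.all (fun di => (PySem.Dict.mk di).contains "section" && (PySem.Dict.mk di).contains "text")) = true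
instance (body_text : List (List (String × String))) : Decidable (Pre_format_body body_text) := by unfold Pre_format_body; infer_instance
def pvWitness_format_body : (List (List (String × String))) :=
  [[("section", "intro"), ("text", "hello")], [("section", "intro"), ("text", " world")]]
def Spec_format_body (body_text : List (List (String × String))) (out : String) : Prop := out = format_body_alt body_text
instance (body_text : List (List (String × String))) (out : String) : Decidable (Spec_format_body body_text out) := by unfold Spec_format_body; infer_instance

-- ===== CLAIM (what is proved, stated in full; the proofs are below) =====
def Claim_equal_format_body : Prop := ∀ (body_text : List (List (String × String))), Dom_format_body body_text → Pre_format_body body_text → Spec_format_body body_text (format_body body_text)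

-- ===== LEMMAS AND PROOFS =====

-- concatenation of the texts of the entries of l whose section is s
def pvCat (l : List (List (String × String))) (s : String) : String :=
  match l with
  | [] => ""
  | di :: l => if pvSec di == s then pvTxt di ++ pvCat l s else pvCat l s

-- keys of the seeding loop / accumulation loop
theorem pv_keys_d0 (l : List (List (String × String))) :
    (l.foldl (fun d di => d.insert (pvSec di) "") (PySem.Dict.empty : PySem.Dict String String)).keys
      = PySem.Set.ofList (l.map pvSec) := by
  rw [PySem.Dict.keys_foldl_insert_key l pvSec (fun _ _ => "") PySem.Dict.empty]
  simp [PySem.Set.update_nil_left]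

theorem pv_nodup_d0 (l : List (List (String × String))) :
    (l.foldl (fun d di => d.insert (pvSec di) "") (PySem.Dict.empty : PySem.Dict String String)).keys.Nodup := by
  exact PySem.Dict.nodup_keys_foldl_insert_key l pvSec (fun _ _ => "") PySem.Dict.empty (by simp)

-- values of the seeding loop are all ""
theorem pv_getD_d0 (l : List (List (String × String))) (d : PySem.Dict String String)
    (h : ∀ k, d.getD k "" = "") (k : String) :
    (l.foldl (fun d di => d.insert (pvSec di) "") d).getD k "" = "" := by
  induction l generalizing d with
  | nil => exact h k
  | cons di l ih =>
      refine ih _ (fun k' => ?_)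
      rw [PySem.Dict.getD_insert]
      split <;> simp [h]

-- the accumulation loop: getD k "" grows by the concatenation of matching texts
theorem pv_getD_acc (l : List (List (String × String))) (d : PySem.Dict String String) (k : String) :
    ((l.map (fun di => (pvSec di, pvTxt di))).foldl
        (fun d p => d.insert p.1 (d.getD p.1 "" ++ p.2)) d).getD k ""
      = d.getD k "" ++ pvCat l k := by
  induction l generalizing d with
  | nil => simp [pvCat]
  | cons di l ih =>
      simp only [List.map_cons, List.foldl_cons]
      rw [ih]
      rw [PySem.Dict.getD_insert]
      by_cases hk : k = pvSec di
      · simp [pvCat, hk, String.append_assoc]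
      · have : (pvSec di == k) = false := by simp [Ne.symm hk]
        simp [pvCat, hk, this]

theorem pv_keys_acc (l : List (List (String × String))) (d : PySem.Dict String String) :
    ((l.map (fun di => (pvSec di, pvTxt di))).foldl
        (fun d p => d.insert p.1 (d.getD p.1 "" ++ p.2)) d).keys
      = PySem.Set.update d.keys (l.map pvSec) := by
  rw [PySem.Dict.keys_foldl_insert_key _ Prod.fst (fun d p => d.getD p.1 "" ++ p.2) d]
  simp [List.map_map, Function.comp_def]

theorem pv_nodup_acc (l : List (List (String × String))) (d : PySem.Dict String String)
    (h : d.keys.Nodup) :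
    ((l.map (fun di => (pvSec di, pvTxt di))).foldl
        (fun d p => d.insert p.1 (d.getD p.1 "" ++ p.2)) d).keys.Nodup :=
  PySem.Dict.nodup_keys_foldl_insert_key _ Prod.fst _ d h

-- Set.update s xs = s when every element of xs is already in s
theorem pv_update_self (xs : List String) :
    PySem.Set.update (PySem.Set.ofList xs) xs = PySem.Set.ofList xs := by
  rw [PySem.Set.update_eq_append_filter]
  have : ((PySem.Set.ofList xs).filter
      (fun y => !(PySem.Set.contains (PySem.Set.ofList xs) y))) = [] := by
    apply List.filter_eq_nil_iff.mpr
    intro y hy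
    simp only [(PySem.Set.contains_iff (PySem.Set.ofList xs) y).mpr hy, Bool.not_true,
      Bool.false_eq_true, not_false_eq_true]
  rw [this, List.append_nil]

-- B's inner rescan appends exactly pvCat
theorem pv_inner (l : List (List (String × String))) (s : String) (b : String) :
    l.foldl (fun body di => if pvSec di == s then body ++ pvTxt di else body) b
      = b ++ pvCat l s := by
  induction l generalizing b with
  | nil => simp [pvCat]
  | cons di l ih =>
      simp only [List.foldl_cons, pvCat]
      by_cases h : (pvSec di == s) = true
      · rw [if_pos h, if_pos h, ih, String.append_assoc]
      · rw [if_neg h, if_neg h, ih]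

theorem format_body_spec : Claim_equal_format_body := by
  intro body_text _ _
  unfold Spec_format_body format_body format_body_alt
  simp only []
  set ks := PySem.Set.ofList (body_text.map pvSec) with hks
  set d1 := (body_text.map (fun di => (pvSec di, pvTxt di))).foldl
      (fun d p => d.insert p.1 (d.getD p.1 "" ++ p.2))
      (body_text.foldl (fun d di => d.insert (pvSec di) "") PySem.Dict.empty) with hd1
  have hnodup : d1.keys.Nodup := pv_nodup_acc _ _ (pv_nodup_d0 _)
  have hkeys : d1.keys = ks := by
    rw [hd1, pv_keys_acc, pv_keys_d0, pv_update_self, hks]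
  have hval : ∀ k, d1.getD k "" = pvCat body_text k := by
    intro k
    rw [hd1, pv_getD_acc, pv_getD_d0 _ _ (fun k => by simp)]
    simp
  have hitems : d1.items = ks.map (fun k => (k, pvCat body_text k)) := by
    rw [PySem.Dict.items_eq_map_keys d1 hnodup "", hkeys]
    exact List.map_congr_left (fun k _ => by rw [hval])
  rw [hitems, List.foldl_map]
  refine List.foldl_ext _ _ "" (fun b k _ => ?_)
  rw [pv_inner]
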